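-- pv_equiv track=rewrite | github.com/coding-samu/Algo2 | graphsMethods.py | DFSMatrix
-- ===== SOURCE A (Python) =====
-- def DFSMatrix(u,M):
--     """
--     Performs a Depth-First Search (DFS) on a given matrix representation of a graph.
--
--     Parameters:
--     u (int): The starting vertex for the DFS.
--     M (list): The adjacency matrix representing the graph.
--
--     Returns:
--     list: A list of boolean values indicating whether each vertex was visited during the DFS.
--     """
--     def DFSr(u,M,visitati):
--         visitati[u] = True
--         for i in range(len(M)):
--             if M[u][i] and not visitati[i]:
--                 DFSr(i,M,visitati)
--     visitati = [False]*len(M)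
--     DFSr(u,M,visitati)
--     return visitati
-- ===== SOURCE B (Python) =====
-- def DFSMatrix(u, M):
--     visitati = [False] * len(M)
--     visitati[u] = True
--     stack = [u]
--     while stack:
--         v = stack.pop()
--         for i in range(len(M)):
--             if M[v][i] and not visitati[i]:
--                 visitati[i] = True
--                 stack.append(i)
--     return visitati
-- ===== Notes on version B (the rewrite author's own statement) =====
-- stated objective: alternative
-- what changed: The recursive DFS helper with a mutated visited list is replaced by an iterative DFS using an explicit stack that marks vertices on push; traversal order differs but the visited set is identical.
-- outside the precondition, e.g. on DFSMatrix(0, [[1, 0], [0]]): A returns [True, False], B returns [True, False]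
import Mathlib
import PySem

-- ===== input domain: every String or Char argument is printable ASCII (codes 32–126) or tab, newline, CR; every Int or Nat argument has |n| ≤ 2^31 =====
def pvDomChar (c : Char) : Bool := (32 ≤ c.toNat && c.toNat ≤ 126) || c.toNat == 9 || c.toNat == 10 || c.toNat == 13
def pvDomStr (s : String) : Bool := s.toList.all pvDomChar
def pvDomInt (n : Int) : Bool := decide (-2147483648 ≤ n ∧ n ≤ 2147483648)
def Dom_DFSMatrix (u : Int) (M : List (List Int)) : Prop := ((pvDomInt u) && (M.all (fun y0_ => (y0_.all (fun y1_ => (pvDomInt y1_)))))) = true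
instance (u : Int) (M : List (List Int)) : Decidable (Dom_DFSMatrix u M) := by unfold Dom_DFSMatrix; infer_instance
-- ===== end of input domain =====

-- B replaces A's recursive DFS by an iterative explicit-stack DFS (mark-on-push); same visited set, different traversal.

-- ===== PORT A =====
-- A's inner recursive helper DFSr: mark u, then for i in range(len(M)) recurse on unvisited
-- truthy neighbours.  The recursion is made total by a fuel argument (the call depth is bounded
-- by the number of vertices, so the fuel len(M)+1 supplied below is never exhausted on Pre_ inputs);
-- the getD defaults are only reachable outside Pre_.
def dfsrA (M : List (List Int)) : Nat → Nat → List Bool → List Bool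
  | 0, _, vis => vis
  | f+1, u, vis =>
    (List.range M.length).foldl
      (fun v i =>
        if ((M.getD u []).getD i 0 != 0) && !(v.getD i false) then dfsrA M f i v else v)
      (vis.set u true)

-- visitati[u] / M[u] apply Python's index rule to u once (negative u counts from the end);
-- every further index i comes from range(len(M)) and is non-negative.
def DFSMatrix (u : Int) (M : List (List Int)) : List Bool :=
  dfsrA M (M.length + 1) (if u < 0 then u + M.length else u).toNat
    (List.replicate M.length false)

-- ===== PORT B =====
-- B's while loop: pop a vertex, scan its row, mark-and-push unvisited truthy neighbours.
-- The Python list-stack (append/pop at the end) is represented head-first: push = cons, pop = head.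
-- Fuel: every iteration pops one vertex and each push marks a fresh vertex, so the number of
-- iterations is at most len(M)+1; the fuel below is never exhausted on Pre_ inputs.
def dfsbLoop (M : List (List Int)) : Nat → List Bool → List Nat → List Bool
  | 0, vis, _ => vis
  | _+1, vis, [] => vis
  | f+1, vis, v :: st =>
    let p := (List.range M.length).foldl
      (fun (p : List Bool × List Nat) i =>
        if ((M.getD v []).getD i 0 != 0) && !(p.1.getD i false)
        then (p.1.set i true, i :: p.2) else p)
      (vis, st)
    dfsbLoop M f p.1 p.2

-- same Python index rule for the start vertex as in port A
def DFSMatrix_alt (u : Int) (M : List (List Int)) : List Bool :=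
  dfsbLoop M (M.length + 1)
    ((List.replicate M.length false).set (if u < 0 then u + M.length else u).toNat true)
    [(if u < 0 then u + M.length else u).toNat]

-- ===== PRECONDITION & SPEC =====
-- Pre_ excludes: (a) start vertices u outside -len(M) ≤ u < len(M), on which A raises
-- IndexError; (b) matrices with a row shorter than len(M) — A raises IndexError whenever such
-- a row is reached, and returns only in the corner where the short row is unreachable from u
-- (B agrees there too; reachability is not a closed-form condition, so all ragged matrices
-- are excluded).
def Pre_DFSMatrix (u : Int) (M : List (List Int)) : Prop :=
  -(M.length : Int) ≤ u ∧ u < (M.length : Int) ∧ ∀ row ∈ M, M.length ≤ row.length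
instance (u : Int) (M : List (List Int)) : Decidable (Pre_DFSMatrix u M) := by
  unfold Pre_DFSMatrix; infer_instance

def pvWitness_DFSMatrix : Int × List (List Int) := (0, [[0, 1], [1, 0]])

def Spec_DFSMatrix (u : Int) (M : List (List Int)) (out : List Bool) : Prop := out = DFSMatrix_alt u M
instance (u : Int) (M : List (List Int)) (out : List Bool) : Decidable (Spec_DFSMatrix u M out) := by unfold Spec_DFSMatrix; infer_instance

-- ===== CLAIM (what is proved, stated in full; the proofs are below) =====
def Claim_equal_DFSMatrix : Prop := ∀ (u : Int) (M : List (List Int)), Dom_DFSMatrix u M → Pre_DFSMatrix u M → Spec_DFSMatrix u M (DFSMatrix u M)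

-- ===== LEMMAS AND PROOFS =====

-- "marked": entry j of the visited list (false off the end; within Pre_ all indices are in range)
def mk (v : List Bool) (j : Nat) : Bool := v.getD j false
-- number of unvisited entries
def fc (v : List Bool) : Nat := v.count false
-- the edge relation both programs test: truthy matrix entry, target in range
def edgeP (M : List (List Int)) (a b : Nat) : Prop :=
  b < M.length ∧ (M.getD a []).getD b 0 ≠ 0
def ReachP (M : List (List Int)) (a b : Nat) : Prop := Relation.ReflTransGen (edgeP M) a b
def Closed (M : List (List Int)) (v : List Bool) (j : Nat) : Prop :=
  ∀ i, edgeP M j i → mk v i = true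

theorem mk_set (v : List Bool) (u j : Nat) :
    mk (v.set u true) j = if j = u ∧ u < v.length then true else mk v j := by
  unfold mk
  by_cases hj : j = u
  · subst hj
    by_cases hu : j < v.length
    · simp [List.getD, hu]
    · simp [List.getD, hu]
  · simp [List.getD, Ne.symm hj, hj]

theorem fc_set (v : List Bool) (u : Nat) (hu : u < v.length) (hf : mk v u = false) :
    fc (v.set u true) + 1 = fc v := by
  induction v generalizing u with
  | nil => simp at hu
  | cons a t ih =>
    cases u with
    | zero => unfold mk at hf; simp at hf; simp [fc, hf]
    | succ k =>
      simp at hu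
      have := ih k hu (by unfold mk at hf ⊢; simpa using hf)
      simp [fc, List.count_cons] at this ⊢
      omega

theorem fc_pos (v : List Bool) (u : Nat) (hu : u < v.length) (hf : mk v u = false) :
    0 < fc v := by
  have hmem : false ∈ v := by
    unfold mk at hf
    have h2 : v.getD u false = v[u] := List.getD_eq_getElem v false hu
    rw [hf] at h2
    exact h2 ▸ List.getElem_mem hu
  simpa [fc, List.count_pos_iff]

theorem fc_set_le (v : List Bool) (u : Nat) : fc (v.set u true) ≤ fc v := by
  by_cases hu : u < v.length
  · by_cases hf : mk v u = false
    · have := fc_set v u hu hf; omega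
    · have : v.set u true = v := by
        apply List.ext_getElem (by simp)
        intro i h1 h2
        rw [List.getElem_set]
        split
        · rename_i h; subst h
          unfold mk at hf
          rw [List.getD_eq_getElem v false hu] at hf
          simpa using hf
        · rfl
      rw [this]
  · rw [List.set_eq_of_length_le (by omega)]

theorem fc_replicate (n : Nat) : fc (List.replicate n false) = n := by
  simp [fc]

theorem mk_replicate (n j : Nat) : mk (List.replicate n false) j = false := by
  unfold mk
  induction n generalizing j with
  | zero => simp
  | succ m ih => cases j <;> simp [List.replicate_succ]

-- shared wrap-up: a visited list containing s and closed under edges contains every vertex reachable from s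
theorem reach_marked (M : List (List Int)) (r : List Bool) (s : Nat)
    (hc : ∀ j, mk r j = true → Closed M r j) (hs : mk r s = true) :
    ∀ j, ReachP M s j → mk r j = true := by
  intro j h
  induction h with
  | refl => exact hs
  | tail _ e ih => exact hc _ ih _ e

-- ----- A side -----
theorem lenA (M : List (List Int)) : ∀ f u vis, (dfsrA M f u vis).length = vis.length := by
  intro f
  induction f with
  | zero => intro u vis; rfl
  | succ f ih =>
    intro u vis
    unfold dfsrA
    refine List.foldlRecOn (motive := fun (v : List Bool) => v.length = vis.length) _ _ (by simp) ?_
    intro v hv i hi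
    split
    · rw [ih]; exact hv
    · exact hv

theorem monoA (M : List (List Int)) : ∀ f u vis j, mk vis j = true → mk (dfsrA M f u vis) j = true := by
  intro f
  induction f with
  | zero => intro u vis j h; exact h
  | succ f ih =>
    intro u vis j h
    unfold dfsrA
    refine List.foldlRecOn (motive := fun v => mk v j = true) _ _ ?_ ?_
    · show mk (vis.set u true) j = true
      rw [mk_set]; split
      · rfl
      · exact h
    · intro v hv i hi
      split
      · exact ih i v j hv
      · exact hv

theorem fcA (M : List (List Int)) : ∀ f u vis, fc (dfsrA M f u vis) ≤ fc vis := by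
  intro f
  induction f with
  | zero => intro u vis; exact le_rfl
  | succ f ih =>
    intro u vis
    unfold dfsrA
    refine List.foldlRecOn (motive := fun v => fc v ≤ fc vis) _ _ (fc_set_le vis u) ?_
    intro v hv i hi
    split
    · exact le_trans (ih i v) hv
    · exact hv

theorem soundA (M : List (List Int)) : ∀ f u vis j, mk (dfsrA M f u vis) j = true →
    mk vis j = true ∨ ReachP M u j := by
  intro f
  induction f with
  | zero => intro u vis j h; exact Or.inl h
  | succ f ih =>
    intro u vis j
    unfold dfsrA
    refine List.foldlRecOn (motive := fun v => mk v j = true → mk vis j = true ∨ ReachP M u j) _ _ ?_ ?_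
    · show mk (vis.set u true) j = true → _
      intro h
      rw [mk_set] at h
      split at h
      · rename_i hju
        exact Or.inr (hju.1 ▸ Relation.ReflTransGen.refl)
      · exact Or.inl h
    · intro v hv i hi h
      split at h
      · rename_i hcond
        rcases ih i v j h with h' | h'
        · exact hv h'
        · refine Or.inr (Relation.ReflTransGen.head ?_ h')
          simp at hcond
          exact ⟨List.mem_range.mp hi, hcond.1⟩
      · exact hv h

theorem completeA (M : List (List Int)) : ∀ f u vis, vis.length = M.length → u < M.length →
    mk vis u = false → fc vis ≤ f →
    mk (dfsrA M f u vis) u = true ∧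
    (∀ i, edgeP M u i → mk (dfsrA M f u vis) i = true) ∧
    (∀ j, mk (dfsrA M f u vis) j = true → mk vis j = true ∨ Closed M (dfsrA M f u vis) j) := by
  intro f
  induction f with
  | zero =>
    intro u vis hlen hu hmk hfc
    exact absurd (fc_pos vis u (by omega) hmk) (by omega)
  | succ f ih =>
    intro u vis hlen hu hmk hfc
    -- vis1 = vis.set u true
    have hfc1 : fc (vis.set u true) ≤ f := by
      have := fc_set vis u (by omega) hmk; omega
    -- the inner fold, with prefix tracking
    have key : ∀ (l : List Nat) (v : List Bool), (∀ x ∈ l, x < M.length) →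
        v.length = M.length → fc v ≤ f →
        (∀ j, mk (vis.set u true) j = true → mk v j = true) →
        (∀ j, mk v j = true → mk (vis.set u true) j = true ∨ Closed M v j) →
        let r := l.foldl (fun v i =>
          if ((M.getD u []).getD i 0 != 0) && !(v.getD i false) then dfsrA M f i v else v) v
        (∀ j, mk v j = true → mk r j = true) ∧
        r.length = M.length ∧ fc r ≤ f ∧
        (∀ j, mk (vis.set u true) j = true → mk r j = true) ∧
        (∀ j, mk r j = true → mk (vis.set u true) j = true ∨ Closed M r j) ∧
        (∀ i ∈ l, ((M.getD u []).getD i 0 ≠ 0) → mk r i = true) := by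
      intro l
      induction l with
      | nil =>
        intro v _ h1 h2 h3 h4
        exact ⟨fun j h => h, h1, h2, h3, h4, by simp⟩
      | cons i l ihl =>
        intro v hmem h1 h2 h3 h4
        simp only [List.foldl_cons]
        by_cases hcond : (((M.getD u []).getD i 0 != 0) && !(v.getD i false)) = true
        · rw [if_pos hcond]
          simp only [Bool.and_eq_true, bne_iff_ne, Bool.not_eq_true'] at hcond
          have hin : i < M.length := hmem i (List.mem_cons_self ..)
          have hvi : mk v i = false := hcond.2
          -- recursive call
          have hrec := ih i v h1 hin hvi h2
          set w := dfsrA M f i v with hw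
          have hmono : ∀ j, mk v j = true → mk w j = true := fun j h => monoA M f i v j h
          have hres := ihl w (fun x hx => hmem x (List.mem_cons_of_mem _ hx))
            (by rw [hw, lenA]; exact h1)
            (le_trans (fcA M f i v) h2)
            (fun j h => hmono j (h3 j h))
            (by
              intro j hj
              rcases hrec.2.2 j hj with h | h
              · rcases h4 j h with h' | h'
                · exact Or.inl h'
                · exact Or.inr (fun t ht => hmono t (h' t ht))
              · exact Or.inr h)
          refine ⟨fun j h => hres.1 j (hmono j h), hres.2.1, hres.2.2.1, hres.2.2.2.1, hres.2.2.2.2.1, ?_⟩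
          intro x hx hedge
          rcases List.mem_cons.mp hx with h | h
          · subst h; exact hres.1 x hrec.1
          · exact hres.2.2.2.2.2 x h hedge
        · rw [if_neg hcond]
          have hres := ihl v (fun x hx => hmem x (List.mem_cons_of_mem _ hx)) h1 h2 h3 h4
          refine ⟨hres.1, hres.2.1, hres.2.2.1, hres.2.2.2.1, hres.2.2.2.2.1, ?_⟩
          intro x hx hedge
          rcases List.mem_cons.mp hx with h | h
          · subst h
            simp only [Bool.and_eq_true, bne_iff_ne, Bool.not_eq_true'] at hcond
            have : mk v x = true := by
              by_cases hm : mk v x = true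
              · exact hm
              · exact absurd ⟨hedge, by unfold mk at hm; simpa using hm⟩ hcond
            exact hres.1 x this
          · exact hres.2.2.2.2.2 x h hedge
    have hkey := key (List.range M.length) (vis.set u true)
      (fun x hx => List.mem_range.mp hx)
      (by simp [hlen]) hfc1 (fun j h => h) (fun j h => Or.inl h)
    have hr : dfsrA M (f+1) u vis = (List.range M.length).foldl (fun v i =>
          if ((M.getD u []).getD i 0 != 0) && !(v.getD i false) then dfsrA M f i v else v)
          (vis.set u true) := rfl
    rw [hr]
    have hu1 : mk (vis.set u true) u = true := by rw [mk_set]; simp; omega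
    have hedge_marked : ∀ i, edgeP M u i →
        mk ((List.range M.length).foldl (fun v i =>
          if ((M.getD u []).getD i 0 != 0) && !(v.getD i false) then dfsrA M f i v else v)
          (vis.set u true)) i = true := by
      intro i hi
      exact hkey.2.2.2.2.2 i (List.mem_range.mpr hi.1) hi.2
    refine ⟨hkey.2.2.2.1 u hu1, hedge_marked, ?_⟩
    intro j hj
    rcases hkey.2.2.2.2.1 j hj with h | h
    · rw [mk_set] at h
      split at h
      · rename_i h'
        exact Or.inr (h'.1 ▸ hedge_marked)
      · exact Or.inl h
    · exact Or.inr h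

-- ----- B side -----
theorem dfsbLoop_succ (M : List (List Int)) (f : Nat) (vis : List Bool) (v : Nat) (st : List Nat) :
    dfsbLoop M (f+1) vis (v :: st) =
      dfsbLoop M f
        ((List.range M.length).foldl
          (fun (p : List Bool × List Nat) i =>
            if ((M.getD v []).getD i 0 != 0) && !(p.1.getD i false)
            then (p.1.set i true, i :: p.2) else p) (vis, st)).1
        ((List.range M.length).foldl
          (fun (p : List Bool × List Nat) i =>
            if ((M.getD v []).getD i 0 != 0) && !(p.1.getD i false)
            then (p.1.set i true, i :: p.2) else p) (vis, st)).2 := rfl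

theorem lenB (M : List (List Int)) : ∀ f vis st, (dfsbLoop M f vis st).length = vis.length := by
  intro f
  induction f with
  | zero => intro vis st; rfl
  | succ f ih =>
    intro vis st
    match st with
    | [] => rfl
    | v :: st =>
      rw [dfsbLoop_succ, ih]
      exact List.foldlRecOn (motive := fun (p : List Bool × List Nat) => p.1.length = vis.length)
        _ _ rfl (by
          intro p hp i hi
          split
          · simpa using hp
          · exact hp)

theorem soundB (M : List (List Int)) (s : Nat) : ∀ f vis st,
    (∀ x ∈ st, ReachP M s x) → (∀ t, mk vis t = true → ReachP M s t) →
    ∀ j, mk (dfsbLoop M f vis st) j = true → ReachP M s j := by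
  intro f
  induction f with
  | zero => intro vis st _ hv j h; exact hv j h
  | succ f ih =>
    intro vis st hst hv j
    match st with
    | [] => exact hv j
    | v :: st =>
      rw [dfsbLoop_succ]
      have hRv : ReachP M s v := hst v (List.mem_cons_self ..)
      have key := List.foldlRecOn
        (motive := fun (p : List Bool × List Nat) =>
          (∀ x ∈ p.2, ReachP M s x) ∧ (∀ t, mk p.1 t = true → ReachP M s t))
        (List.range M.length)
        (fun (p : List Bool × List Nat) i =>
          if ((M.getD v []).getD i 0 != 0) && !(p.1.getD i false)
          then (p.1.set i true, i :: p.2) else p)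
        (b := (vis, st))
        ⟨fun x hx => hst x (List.mem_cons_of_mem _ hx), hv⟩
        (by
          intro p hp i hi
          dsimp only
          split
          · rename_i hcond
            simp only [Bool.and_eq_true, bne_iff_ne, Bool.not_eq_true'] at hcond
            have hRi : ReachP M s i :=
              Relation.ReflTransGen.tail hRv ⟨List.mem_range.mp hi, hcond.1⟩
            refine ⟨?_, ?_⟩
            · intro x hx
              rcases List.mem_cons.mp hx with h | h
              · exact h ▸ hRi
              · exact hp.1 x h
            · intro t ht
              rw [mk_set] at ht
              split at ht
              · rename_i h'; exact h'.1 ▸ hRi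
              · exact hp.2 t ht
          · exact hp)
      exact fun h => ih _ _ key.1 key.2 j h

theorem completeB (M : List (List Int)) : ∀ f vis st, vis.length = M.length →
    (∀ x ∈ st, mk vis x = true) →
    (∀ j, mk vis j = true → j ∈ st ∨ Closed M vis j) →
    st.length + fc vis ≤ f →
    (∀ j, mk vis j = true → mk (dfsbLoop M f vis st) j = true) ∧
    (∀ j, mk (dfsbLoop M f vis st) j = true → Closed M (dfsbLoop M f vis st) j) := by
  intro f
  induction f with
  | zero =>
    intro vis st hlen hstm hcl hms
    have hst : st = [] := by
      cases st with
      | nil => rfl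
      | cons a t => simp at hms
    subst hst
    refine ⟨fun j h => h, ?_⟩
    intro j hj
    rcases hcl j hj with h | h
    · simp at h
    · exact h
  | succ f ih =>
    intro vis st hlen hstm hcl hms
    match st with
    | [] =>
      refine ⟨fun j h => h, ?_⟩
      intro j hj
      rcases hcl j hj with h | h
      · simp at h
      · exact h
    | v :: st =>
      rw [dfsbLoop_succ]
      -- inner fold with prefix tracking
      have key : ∀ (l : List Nat) (p : List Bool × List Nat), (∀ x ∈ l, x < M.length) →
          p.1.length = M.length →
          (∀ x ∈ p.2, mk p.1 x = true) →
          (∀ t, mk vis t = true → mk p.1 t = true) →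
          (∀ j, mk p.1 j = true → j ∈ (v :: p.2) ∨ Closed M p.1 j) →
          st ⊆ p.2 →
          let r := l.foldl (fun (p : List Bool × List Nat) i =>
            if ((M.getD v []).getD i 0 != 0) && !(p.1.getD i false)
            then (p.1.set i true, i :: p.2) else p) p
          r.1.length = M.length ∧
          (∀ x ∈ r.2, mk r.1 x = true) ∧
          (∀ t, mk p.1 t = true → mk r.1 t = true) ∧
          (∀ j, mk r.1 j = true → j ∈ (v :: r.2) ∨ Closed M r.1 j) ∧
          st ⊆ r.2 ∧
          r.2.length + fc r.1 = p.2.length + fc p.1 ∧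
          (∀ i ∈ l, ((M.getD v []).getD i 0 ≠ 0) → mk r.1 i = true) := by
        intro l
        induction l with
        | nil =>
          intro p _ h1 h2 h3 h4 h5
          exact ⟨h1, h2, fun t h => h, h4, h5, rfl, by simp⟩
        | cons i l ihl =>
          intro p hmem h1 h2 h3 h4 h5
          simp only [List.foldl_cons]
          by_cases hcond : (((M.getD v []).getD i 0 != 0) && !(p.1.getD i false)) = true
          · rw [if_pos hcond]
            simp only [Bool.and_eq_true, bne_iff_ne, Bool.not_eq_true'] at hcond
            have hin : i < M.length := hmem i (List.mem_cons_self ..)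
            have hpi : mk p.1 i = false := hcond.2
            have hmono1 : ∀ t, mk p.1 t = true → mk (p.1.set i true) t = true := by
              intro t ht; rw [mk_set]; split
              · rfl
              · exact ht
            have hmi : mk (p.1.set i true) i = true := by
              rw [mk_set]; simp; omega
            have hres := ihl (p.1.set i true, i :: p.2)
              (fun x hx => hmem x (List.mem_cons_of_mem _ hx))
              (by simpa using h1)
              (by
                intro x hx
                rcases List.mem_cons.mp hx with h | h
                · exact h ▸ hmi
                · exact hmono1 x (h2 x h))
              (fun t ht => hmono1 t (h3 t ht))
              (by
                intro j hj
                rw [mk_set] at hj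
                split at hj
                · rename_i h'
                  left
                  simp [h'.1]
                · rcases h4 j hj with h | h
                  · rcases List.mem_cons.mp h with h' | h'
                    · exact Or.inl (by simp [h'])
                    · exact Or.inl (by simp [h'])
                  · exact Or.inr (fun t ht => hmono1 t (h t ht)))
              (fun x hx => List.mem_cons_of_mem _ (h5 hx))
            refine ⟨hres.1, hres.2.1, fun t h => hres.2.2.1 t (hmono1 t h), hres.2.2.2.1,
              hres.2.2.2.2.1, ?_, ?_⟩
            · have hcnt : (i :: p.2).length + fc (p.1.set i true) = p.2.length + fc p.1 := by
                have := fc_set p.1 i (by omega) hpi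
                simp only [List.length_cons]
                omega
              rw [hres.2.2.2.2.2.1]
              simpa using hcnt
            · intro x hx hedge
              rcases List.mem_cons.mp hx with h | h
              · subst h
                exact hres.2.2.1 x hmi
              · exact hres.2.2.2.2.2.2 x h hedge
          · rw [if_neg hcond]
            have hres := ihl p (fun x hx => hmem x (List.mem_cons_of_mem _ hx)) h1 h2 h3 h4 h5
            refine ⟨hres.1, hres.2.1, hres.2.2.1, hres.2.2.2.1, hres.2.2.2.2.1,
              hres.2.2.2.2.2.1, ?_⟩
            intro x hx hedge
            rcases List.mem_cons.mp hx with h | h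
            · subst h
              simp only [Bool.and_eq_true, bne_iff_ne, Bool.not_eq_true'] at hcond
              have hm : mk p.1 x = true := by
                by_cases hm : mk p.1 x = true
                · exact hm
                · exact absurd ⟨hedge, by unfold mk at hm; simpa using hm⟩ hcond
              exact hres.2.2.1 x hm
            · exact hres.2.2.2.2.2.2 x h hedge
      have hkey := key (List.range M.length) (vis, st)
        (fun x hx => List.mem_range.mp hx) hlen
        (fun x hx => hstm x (List.mem_cons_of_mem _ hx))
        (fun t h => h)
        (by
          intro j hj
          rcases hcl j hj with h | h
          · rcases List.mem_cons.mp h with h' | h'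
            · exact Or.inl (by simp [h'])
            · exact Or.inl (by simp [h'])
          · exact Or.inr h)
        (fun x hx => hx)
      set r := (List.range M.length).foldl
          (fun (p : List Bool × List Nat) i =>
            if ((M.getD v []).getD i 0 != 0) && !(p.1.getD i false)
            then (p.1.set i true, i :: p.2) else p) (vis, st) with hrdef
      -- v is closed in r.1
      have hvclosed : Closed M r.1 v := by
        intro i hi
        exact hkey.2.2.2.2.2.2 i (List.mem_range.mpr hi.1) hi.2
      have hrec := ih r.1 r.2 hkey.1 hkey.2.1
        (by
          intro j hj
          rcases hkey.2.2.2.1 j hj with h | h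
          · rcases List.mem_cons.mp h with h' | h'
            · exact Or.inr (h' ▸ hvclosed)
            · exact Or.inl h'
          · exact Or.inr h)
        (by
          have h6 := hkey.2.2.2.2.2.1
          dsimp only at h6
          simp only [List.length_cons] at hms
          omega)
      exact ⟨fun j h => hrec.1 j (hkey.2.2.1 j h), hrec.2⟩

-- lists with equal length and equal mk are equal
theorem eq_of_mk (a b : List Bool) (hl : a.length = b.length)
    (h : ∀ j, mk a j = mk b j) : a = b := by
  apply List.ext_getElem hl
  intro i h1 h2
  have h3 := h i
  unfold mk at h3
  rwa [List.getD_eq_getElem a false h1, List.getD_eq_getElem b false h2] at h3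

-- ===== VERDICT (by name: the statement is the Claim_ definition above) =====
theorem DFSMatrix_spec : Claim_equal_DFSMatrix := by
  intro u M _ hpre
  obtain ⟨hu0, hun, _⟩ := hpre
  unfold Spec_DFSMatrix DFSMatrix DFSMatrix_alt
  set s := (if u < 0 then u + M.length else u).toNat with hs
  have hsn : s < M.length := by
    rw [hs]; split <;> omega
  -- A's characterisation
  have hA := completeA M (M.length + 1) s (List.replicate M.length false)
    (by simp) hsn (mk_replicate _ _) (by rw [fc_replicate]; omega)
  have hAc : ∀ j, mk (dfsrA M (M.length+1) s (List.replicate M.length false)) j = true →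
      Closed M (dfsrA M (M.length+1) s (List.replicate M.length false)) j := by
    intro j hj
    rcases hA.2.2 j hj with h | h
    · rw [mk_replicate] at h; exact absurd h (by simp)
    · exact h
  -- B's characterisation
  have hv0 : mk ((List.replicate M.length false).set s true) s = true := by
    rw [mk_set]; simp [hsn]
  have hB := completeB M (M.length + 1) ((List.replicate M.length false).set s true) [s]
    (by simp) (by intro x hx; simp at hx; subst hx; exact hv0)
    (by intro j hj; rw [mk_set] at hj
        by_cases h : j = s
        · left; simp [h]
        · right; simp [h] at hj; rw [mk_replicate] at hj; exact absurd hj (by simp))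
    (by have h1 := fc_set (List.replicate M.length false) s (by simpa) (mk_replicate _ _)
        rw [fc_replicate] at h1
        simp only [List.length_singleton]
        omega)
  -- both equal the reachable set
  apply eq_of_mk
  · rw [lenA, lenB]; simp
  · intro j
    have hAj : mk (dfsrA M (M.length+1) s (List.replicate M.length false)) j = true ↔ ReachP M s j := by
      constructor
      · intro h
        rcases soundA M _ _ _ _ h with h' | h'
        · rw [mk_replicate] at h'; exact absurd h' (by simp)
        · exact h'
      · exact reach_marked M _ s hAc hA.1 j
    have hBj : mk (dfsbLoop M (M.length+1) ((List.replicate M.length false).set s true) [s]) j = true ↔ ReachP M s j := by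
      constructor
      · intro h
        refine soundB M s _ _ _ ?_ ?_ j h
        · intro x hx; simp at hx; subst hx; exact Relation.ReflTransGen.refl
        · intro t ht; rw [mk_set] at ht
          by_cases h' : t = s
          · subst h'; exact Relation.ReflTransGen.refl
          · simp [h'] at ht; rw [mk_replicate] at ht; exact absurd ht (by simp)
      · exact reach_marked M _ s hB.2 (hB.1 s hv0) j
    rw [Bool.eq_iff_iff, hAj, hBj]
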